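-- pv_equiv track=rewrite | github.com/pypi-data/pypi-mirror-246 | packages/egc/egc-0.3.0-py3-none-any.whl/egc/utils/graph_statistics.py | get_motifs_with_one_more_node
-- ===== SOURCE A (Python) =====
-- from typing import Dict
-- from typing import Set
-- from typing import Tuple
--
-- def get_motifs_with_one_more_node(motifs: Set[Tuple],
--                                   neighbor_set: Dict) -> Set[Tuple]:
--     """get motifs recursively
--
--     Args:
--         motifs (Set[Tuple]): motifs set
--         neighbor_set (Dict): neighbor set indexed by node id
--
--     Returns:
--         Set[Tuple]: motifs set enlarged with one more node for each motif
--     """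
--     motifs_next = set()
--     for motif in motifs:
--         nei = neighbor_set[motif[0]] - set(motif)
--         for node in motif[1:]:
--             nei = nei & neighbor_set[node]
--         for node in nei:
--             motifs_next.add(tuple(sorted(list(motif) + [node])))
--     return motifs_next
-- ===== SOURCE B (Python) =====
-- def get_motifs_with_one_more_node(motifs, neighbor_set):
--     """Counting re-implementation: one frequency pass over every member's
--     neighbors replaces A's progressive set intersections; a node extends the
--     motif iff it is counted len(motif) times and is not a member itself."""
--     motifs_next = set()
--     for motif in motifs:
--         count = {}
--         for n in motif:
--             for x in neighbor_set[n]: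
--                 count[x] = count.get(x, 0) + 1
--         members = set(motif)
--         k = len(motif)
--         for x in neighbor_set[motif[0]]:
--             if x not in members and count.get(x, 0) == k:
--                 motifs_next.add(tuple(sorted(list(motif) + [x])))
--     return motifs_next
-- ===== Notes on version B (the rewrite author's own statement) =====
-- stated objective: alternative
-- what changed: Replaces A's progressive set-intersection of neighbor sets (start from N(motif[0]) minus the motif, then intersect with N(node) for each further member) by a single counting pass: one frequency dict over every member's neighbor list, keeping the non-member nodes of N(motif[0]) whose count equals len(motif).
import Mathlib
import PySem

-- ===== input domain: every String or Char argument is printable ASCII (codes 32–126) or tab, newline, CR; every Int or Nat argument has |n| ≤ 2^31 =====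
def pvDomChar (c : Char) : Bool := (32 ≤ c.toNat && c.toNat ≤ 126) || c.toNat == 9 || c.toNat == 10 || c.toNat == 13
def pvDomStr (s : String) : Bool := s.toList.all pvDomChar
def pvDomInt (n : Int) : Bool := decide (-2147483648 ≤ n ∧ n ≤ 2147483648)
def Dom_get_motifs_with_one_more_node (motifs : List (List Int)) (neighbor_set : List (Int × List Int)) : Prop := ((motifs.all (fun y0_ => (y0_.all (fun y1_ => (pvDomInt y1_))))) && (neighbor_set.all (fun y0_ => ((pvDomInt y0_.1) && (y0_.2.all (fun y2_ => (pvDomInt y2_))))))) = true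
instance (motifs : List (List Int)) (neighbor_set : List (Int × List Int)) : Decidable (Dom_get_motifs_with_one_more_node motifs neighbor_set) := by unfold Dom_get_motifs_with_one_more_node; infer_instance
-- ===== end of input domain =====

-- B replaces A's progressive set intersections by one counting pass over every
-- motif member's neighbors (objective: alternative decomposition, similar cost).


-- ===== PORT A =====
-- literal transliteration of A: nei = N(motif[0]) - set(motif), then nei &= N(node)
-- for node in motif[1:], then add tuple(sorted(list(motif)+[node])) for node in nei.
def get_motifs_with_one_more_node (motifs : List (List Int)) (neighbor_set : List (Int × List Int)) : List (List Int) :=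
  motifs.foldl (fun motifs_next motif =>
    let d := PySem.Dict.mk neighbor_set
    let nei0 := PySem.Set.diff (d.getD (PySem.List.pyGetD motif 0 0) []) (PySem.Set.ofList motif)
    let nei := (PySem.List.slice motif (some 1) none).foldl
      (fun nei node => PySem.Set.inter nei (d.getD node [])) nei0
    nei.foldl (fun mn node =>
      PySem.Set.add mn (PySem.List.sorted (motif ++ [node]) (fun y => y) false)) motifs_next) []

-- ===== PORT B =====
-- literal transliteration of Source B: build the frequency dict `count`, then scan
-- N(motif[0]) once keeping nodes counted len(motif) times that are not members.
def get_motifs_with_one_more_node_alt (motifs : List (List Int)) (neighbor_set : List (Int × List Int)) : List (List Int) :=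
  motifs.foldl (fun motifs_next motif =>
    let d := PySem.Dict.mk neighbor_set
    let count := motif.foldl (fun c n =>
      (d.getD n []).foldl (fun c x => c.insert x (c.getD x 0 + 1)) c) PySem.Dict.empty
    let members := PySem.Set.ofList motif
    let k : Int := motif.length
    (d.getD (PySem.List.pyGetD motif 0 0) []).foldl (fun mn x =>
      if !members.contains x && count.getD x 0 == k then
        PySem.Set.add mn (PySem.List.sorted (motif ++ [x]) (fun y => y) false)
      else mn) motifs_next) []

-- ===== PRECONDITION & SPEC =====
-- Pre_ excludes exactly the inputs where A raises (IndexError on an empty motif,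
-- KeyError on a motif node missing from neighbor_set), plus — as the
-- set-representation invariant, not a real exclusion — it requires each
-- neighbor list to be duplicate-free, since Python's neighbor_set values are
-- sets and a list with duplicates encodes no Python input at all.
def Pre_get_motifs_with_one_more_node (motifs : List (List Int)) (neighbor_set : List (Int × List Int)) : Prop :=
  (∀ m ∈ motifs, m ≠ [] ∧ ∀ n ∈ m, (PySem.Dict.mk neighbor_set).contains n = true) ∧
  (∀ p ∈ neighbor_set, p.2.Nodup)
instance (motifs : List (List Int)) (neighbor_set : List (Int × List Int)) : Decidable (Pre_get_motifs_with_one_more_node motifs neighbor_set) := by unfold Pre_get_motifs_with_one_more_node; infer_instance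

def pvWitness_get_motifs_with_one_more_node : List (List Int) × (List (Int × List Int)) :=
  ([[1, 2]], [(1, [2, 3, 4]), (2, [1, 3]), (3, [1, 2]), (4, [1])])

def Spec_get_motifs_with_one_more_node (motifs : List (List Int)) (neighbor_set : List (Int × List Int)) (out : List (List Int)) : Prop := out = get_motifs_with_one_more_node_alt motifs neighbor_set
instance (motifs : List (List Int)) (neighbor_set : List (Int × List Int)) (out : List (List Int)) : Decidable (Spec_get_motifs_with_one_more_node motifs neighbor_set out) := by unfold Spec_get_motifs_with_one_more_node; infer_instance

-- ===== CLAIM (what is proved, stated in full; the proofs are below) =====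
def Claim_equal_get_motifs_with_one_more_node : Prop := ∀ (motifs : List (List Int)) (neighbor_set : List (Int × List Int)), Dom_get_motifs_with_one_more_node motifs neighbor_set → Pre_get_motifs_with_one_more_node motifs neighbor_set → Spec_get_motifs_with_one_more_node motifs neighbor_set (get_motifs_with_one_more_node motifs neighbor_set)

-- ===== LEMMAS AND PROOFS =====

-- folding `if p x then g acc x else acc` over l is folding g over l.filter p
theorem pv_foldl_if_filter {α β : Type} (p : α → Bool) (g : β → α → β)
    (l : List α) (acc : β) :
    l.foldl (fun acc x => if p x then g acc x else acc) acc
      = (l.filter p).foldl g acc := by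
  induction l generalizing acc with
  | nil => rfl
  | cons h t ih => by_cases hp : p h <;> simp [hp, ih]

-- a foldl of filters is one filter by the conjunction
theorem pv_foldl_filter {α : Type} (t : List Int) (l : List α) (q : Int → α → Bool) :
    t.foldl (fun l n => l.filter (q n)) l
      = l.filter (fun x => t.all (fun n => q n x)) := by
  induction t generalizing l with
  | nil => simp
  | cons h tl ih => simp [ih, List.filter_filter, Bool.and_comm]

-- the counter's final value at x: the number of neighbor-list occurrences of x
theorem pv_counter_getD (d : PySem.Dict Int (List Int)) (m : List Int)
    (c : PySem.Dict Int Int) (x : Int) :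
    (m.foldl (fun c n => (d.getD n []).foldl
        (fun c y => c.insert y (c.getD y 0 + 1)) c) c).getD x 0
      = c.getD x 0 + ((m.map (fun n => ((d.getD n []).count x : Int))).sum) := by
  induction m generalizing c with
  | nil => simp
  | cons h t ih => simp [ih, PySem.Dict.getD_foldl_insert_add_one]; ring

-- any property of [] and of every value stored in ns holds of getD _ k []
theorem pv_getD_mk_prop {P : List Int → Prop} (ns : List (Int × List Int))
    (h0 : P ([] : List Int)) :
    (∀ p ∈ ns, P p.2) → ∀ k : Int, P ((PySem.Dict.mk ns).getD k []) := by
  induction ns with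
  | nil => intro _ k; simpa [PySem.Dict.getD] using h0
  | cons p t ih =>
      obtain ⟨pk, pv⟩ := p
      intro hns k
      by_cases hk : (pk == k) = true
      · have := hns (pk, pv) (by simp)
        simpa [PySem.Dict.getD, PySem.Dict.get?_mk_cons, hk] using this
      · simp only [PySem.Dict.getD, PySem.Dict.get?_mk_cons, hk, if_false, Bool.false_eq_true]
        have := ih (fun q hq => hns q (by simp [hq])) k
        simpa [PySem.Dict.getD] using this

-- sum of a ≤1-valued map is at most the length
theorem pv_sum_le_len (m : List Int) (f : Int → Int) (hf : ∀ n ∈ m, f n ≤ 1) :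
    (m.map f).sum ≤ (m.length : Int) := by
  induction m with
  | nil => simp
  | cons h t ih =>
      have h1 := hf h (by simp)
      have h2 := ih (fun n hn => hf n (by simp [hn]))
      simp only [List.map_cons, List.sum_cons, List.length_cons]
      push_cast
      omega

-- Nodup-bounded counts: the sum hits m.length exactly when every list contains x
theorem pv_sum_counts_eq_len (d : PySem.Dict Int (List Int)) (m : List Int) (x : Int)
    (hnd : ∀ n ∈ m, (d.getD n []).Nodup) :
    ((m.map (fun n => ((d.getD n []).count x : Int))).sum = (m.length : Int))
      ↔ ∀ n ∈ m, (d.getD n []).contains x = true := by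
  induction m with
  | nil => simp
  | cons h t ih =>
      have hc1 : ∀ n ∈ h :: t, ((d.getD n []).count x : Int) ≤ 1 := fun n hn => by
        exact_mod_cast (List.nodup_iff_count_le_one.mp (hnd n hn)) x
      have hsumle := pv_sum_le_len t (fun n => ((d.getD n []).count x : Int))
        (fun n hn => hc1 n (by simp [hn]))
      have hiff := ih (fun n hn => hnd n (by simp [hn]))
      simp only [List.map_cons, List.sum_cons, List.length_cons]
      constructor
      · intro hsum
        have hh1 := hc1 h (by simp)
        have hsplit : ((d.getD h []).count x : Int) = 1 ∧
            (t.map (fun n => ((d.getD n []).count x : Int))).sum = (t.length : Int) := by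
          constructor <;> (push_cast at hsum ⊢; omega)
        intro n hn
        rcases List.mem_cons.mp hn with rfl | hn'
        · have h1 : (d.getD n []).count x = 1 := by exact_mod_cast hsplit.1
          have : x ∈ d.getD n [] := List.count_pos_iff.mp (by omega)
          simpa [List.contains_iff_mem] using this
        · exact (hiff.mp hsplit.2) n hn'
      · intro hall
        have h1 : (d.getD h []).count x = 1 := by
          have hx : x ∈ d.getD h [] := by
            simpa [List.contains_iff_mem] using hall h (by simp)
          have hpos := List.count_pos_iff.mpr hx
          have hle : (d.getD h []).count x ≤ 1 := by
            exact_mod_cast hc1 h (by simp)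
          omega
        have h2 := hiff.mpr (fun n hn => hall n (by simp [hn]))
        rw [h2, h1]
        push_cast
        ring

-- the per-motif step of A equals the per-motif step of B
theorem pv_step_eq (neighbor_set : List (Int × List Int)) (motif : List Int)
    (hm : motif ≠ []) (hkeys : ∀ n ∈ motif, (PySem.Dict.mk neighbor_set).contains n = true)
    (hvals : ∀ p ∈ neighbor_set, p.2.Nodup) (acc : List (List Int)) :
    (let d := PySem.Dict.mk neighbor_set
     let nei0 := PySem.Set.diff (d.getD (PySem.List.pyGetD motif 0 0) []) (PySem.Set.ofList motif)
     let nei := (PySem.List.slice motif (some 1) none).foldl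
        (fun nei node => PySem.Set.inter nei (d.getD node [])) nei0
     nei.foldl (fun mn node =>
        PySem.Set.add mn (PySem.List.sorted (motif ++ [node]) (fun y => y) false)) acc)
    = (let d := PySem.Dict.mk neighbor_set
       let count := motif.foldl (fun c n =>
          (d.getD n []).foldl (fun c x => c.insert x (c.getD x 0 + 1)) c) PySem.Dict.empty
       let members := PySem.Set.ofList motif
       let k : Int := motif.length
       (d.getD (PySem.List.pyGetD motif 0 0) []).foldl (fun mn x =>
          if !members.contains x && count.getD x 0 == k then
            PySem.Set.add mn (PySem.List.sorted (motif ++ [x]) (fun y => y) false)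
          else mn) acc) := by
  obtain ⟨h, t, rfl⟩ := List.exists_cons_of_ne_nil hm
  simp only []
  set d := PySem.Dict.mk neighbor_set with hd
  have hnd : ∀ n, (d.getD n []).Nodup := fun n =>
    pv_getD_mk_prop neighbor_set List.nodup_nil hvals n
  -- motif[0] and motif[1:]
  have h0 : PySem.List.pyGetD (h :: t) 0 0 = h := by simp [pysem]
  have h1 : PySem.List.slice (h :: t) (some 1) none = t := by
    rw [PySem.List.slice_from _ (by norm_num)]; rfl
  rw [h0, h1]
  -- A's nei is one filter of N(h)
  rw [show (fun (nei : PySem.Set Int) node => PySem.Set.inter nei (d.getD node []))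
        = (fun (nei : List Int) node => nei.filter (fun x => (d.getD node []).contains x)) from rfl,
      pv_foldl_filter]
  rw [show PySem.Set.diff (d.getD h []) (PySem.Set.ofList (h :: t))
        = (d.getD h []).filter (fun x => !(PySem.Set.ofList (h :: t)).contains x) from rfl,
      List.filter_filter]
  -- B's loop is a fold over a filter of N(h)
  rw [pv_foldl_if_filter]
  -- the two filtered lists coincide
  congr 1
  apply List.filter_congr
  intro x hx
  have hnum : (List.foldl (fun c n => (d.getD n []).foldl
      (fun c y => c.insert y (c.getD y 0 + 1)) c) PySem.Dict.empty (h :: t)).getD x 0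
      = ((h :: t).map (fun n => ((d.getD n []).count x : Int))).sum := by
    have := pv_counter_getD d (h :: t) PySem.Dict.empty x
    have hemp : (PySem.Dict.empty : PySem.Dict Int Int).getD x 0 = 0 := rfl
    rw [hemp, zero_add] at this
    exact this
  have hsum := pv_sum_counts_eq_len d (h :: t) x (fun n _ => hnd n)
  rcases hb : (PySem.Set.ofList (h :: t)).contains x with _ | _
  · simp only [Bool.not_false, Bool.true_and, Bool.and_true]
    rw [Bool.eq_iff_iff]
    simp only [List.all_eq_true, beq_iff_eq, hnum]
    constructor
    · intro hall
      apply hsum.mpr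
      intro n hn
      rcases List.mem_cons.mp hn with rfl | hn'
      · simpa [List.contains_iff_mem] using hx
      · exact hall n hn'
    · intro hc n hn
      exact hsum.mp hc n (List.mem_cons_of_mem _ hn)
  · simp
-- ===== VERDICT (by name: the statement is the Claim_ definition above) =====
theorem get_motifs_with_one_more_node_spec : Claim_equal_get_motifs_with_one_more_node := by
  intro motifs neighbor_set _ hpre
  unfold Spec_get_motifs_with_one_more_node get_motifs_with_one_more_node get_motifs_with_one_more_node_alt
  apply PySem.List.foldl_congr_mem
  intro acc m hm
  exact pv_step_eq neighbor_set m (hpre.1 m hm).1 (hpre.1 m hm).2 hpre.2 acc
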